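-- pv_equiv track=rewrite | github.com/paulklemstine/factor | lean/demo/Pythagorean/five_directions_demo.py | berggren_descent
-- ===== SOURCE A (Python) =====
-- def berggren_descent(m, n):
--     """Descend from Euclid parameters (m,n) to (2,1) = root of (3,4,5).
--     Returns the sequence of matrices applied."""
--     path = []
--     while (m, n) != (2, 1):
--         if m <= 0 or n <= 0 or m <= n:
--             break
--         # Determine which inverse to apply
--         # M1 = [[2,-1],[1,0]], M3 = [[1,2],[0,1]]
--         # M1_inv = [[0,1],[-1,2]], M3_inv = [[1,-2],[0,1]]
--
--         # Try M3_inv first: (m, n) -> (m-2n, n)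
--         m_new, n_new = m - 2*n, n
--         if m_new > n_new > 0:
--             m, n = m_new, n_new
--             path.append('M3_inv')
--             continue
--
--         # Try M1_inv: (m, n) -> (n, 2n-m)
--         m_new, n_new = n, 2*n - m
--         if m_new > n_new > 0:
--             m, n = m_new, n_new
--             path.append('M1_inv')
--             continue
--
--         # Fallback
--         break
--
--     return path
-- ===== SOURCE B (Python) =====
-- def berggren_descent(m, n):
--     """Descend from Euclid parameters (m,n) to (2,1) = root of (3,4,5).
--     Returns the sequence of matrices applied."""
--     path = []
--     while (m, n) != (2, 1):
--         if m <= 0 or n <= 0 or m <= n: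
--             break
--         if m > 3 * n:
--             # M3_inv applies; take all consecutive M3_inv steps at once:
--             # k = least count with m - 2*k*n <= 3*n
--             k = (m - 3 * n - 1) // (2 * n) + 1
--             path.extend(['M3_inv'] * k)
--             m -= 2 * k * n
--             continue
--         # Try M1_inv: (m, n) -> (n, 2n-m)
--         if n > 2 * n - m > 0:
--             m, n = n, 2 * n - m
--             path.append('M1_inv')
--             continue
--         break
--     return path
-- ===== Notes on version B (the rewrite author's own statement) =====
-- stated objective: faster
-- what changed: Replaces A's one-at-a-time M3_inv subtraction with a closed-form batch: when m > 3n it computes the exact count k = (m-3n-1)//(2n)+1 of consecutive M3_inv steps, emits them all at once and jumps m -= 2kn, so each loop iteration is one continued-fraction-style division step instead of one subtraction.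
import Mathlib
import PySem

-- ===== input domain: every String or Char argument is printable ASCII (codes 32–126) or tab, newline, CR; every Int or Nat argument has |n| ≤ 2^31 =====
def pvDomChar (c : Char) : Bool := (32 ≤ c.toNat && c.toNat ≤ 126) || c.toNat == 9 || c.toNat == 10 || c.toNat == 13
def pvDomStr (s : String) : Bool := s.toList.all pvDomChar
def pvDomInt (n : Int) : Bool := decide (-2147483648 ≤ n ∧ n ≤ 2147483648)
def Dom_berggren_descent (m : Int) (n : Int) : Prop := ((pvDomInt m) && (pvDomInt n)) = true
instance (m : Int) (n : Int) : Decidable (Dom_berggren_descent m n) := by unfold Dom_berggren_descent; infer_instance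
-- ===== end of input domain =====

-- B batches consecutive M3_inv steps with a closed-form count (division instead of
-- repeated subtraction): asymptotically fewer loop iterations; return value proved equal.

-- ===== PORT A =====
-- literal port of A's while loop: one inverse matrix step per iteration
def berggren_descent (m : Int) (n : Int) : List String :=
  if ¬(m = 2 ∧ n = 1) then
    if m ≤ 0 ∨ n ≤ 0 ∨ m ≤ n then []
    else if m - 2*n > n ∧ n > 0 then
      "M3_inv" :: berggren_descent (m - 2*n) n
    else if n > 2*n - m ∧ 2*n - m > 0 then
      "M1_inv" :: berggren_descent n (2*n - m)
    else []
  else []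
termination_by m.toNat
decreasing_by
  · omega
  · omega

-- ===== PORT B =====
-- port of Source B: batched M3_inv with k = (m - 3n - 1)//(2n) + 1, else single M1_inv
def berggren_descent_alt (m : Int) (n : Int) : List String :=
  if ¬(m = 2 ∧ n = 1) then
    if m ≤ 0 ∨ n ≤ 0 ∨ m ≤ n then []
    else if h3 : m > 3*n then
      let k : Int := PySem.Int.floordiv (m - 3*n - 1) (2*n) + 1
      List.replicate k.toNat "M3_inv" ++ berggren_descent_alt (m - 2*k*n) n
    else if n > 2*n - m ∧ 2*n - m > 0 then
      "M1_inv" :: berggren_descent_alt n (2*n - m)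
    else []
  else []
termination_by m.toNat
decreasing_by
  · have hk : 0 ≤ PySem.Int.floordiv (m - 3*n - 1) (2*n) := by
      rw [PySem.Int.floordiv_eq_ediv_of_pos (by omega)]
      exact Int.ediv_nonneg (by omega) (by omega)
    have h2 : 2*n ≤ 2*(PySem.Int.floordiv (m - 3*n - 1) (2*n) + 1)*n := by nlinarith [mul_nonneg hk (show (0:ℤ) ≤ n by omega)]
    omega
  · omega

-- ===== PRECONDITION & SPEC =====
def Spec_berggren_descent (m : Int) (n : Int) (out : List String) : Prop := out = berggren_descent_alt m n
instance (m : Int) (n : Int) (out : List String) : Decidable (Spec_berggren_descent m n out) := by unfold Spec_berggren_descent; infer_instance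

-- ===== CLAIM (what is proved, stated in full; the proofs are below) =====
def Claim_equal_berggren_descent : Prop := ∀ (m : Int) (n : Int), Dom_berggren_descent m n → Spec_berggren_descent m n (berggren_descent m n)

-- ===== LEMMAS AND PROOFS =====

-- one batched M3_inv block of B unrolls one single M3_inv step of A
theorem alt_m3_step (m n : Int) (hn : 0 < n) (h3 : 3*n < m) :
    berggren_descent_alt m n = "M3_inv" :: berggren_descent_alt (m - 2*n) n := by
  have h21 : ¬(m = 2 ∧ n = 1) := by omega
  have hg : ¬(m ≤ 0 ∨ n ≤ 0 ∨ m ≤ n) := by omega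
  rw [berggren_descent_alt]
  simp only [h21, not_false_iff, if_true, hg, if_false, h3, dif_pos]
  rw [PySem.Int.floordiv_eq_ediv_of_pos (by omega)]
  by_cases h5 : 3*n < m - 2*n
  · conv_rhs => rw [berggren_descent_alt]
    have h21' : ¬(m - 2*n = 2 ∧ n = 1) := by omega
    have hg' : ¬(m - 2*n ≤ 0 ∨ n ≤ 0 ∨ m - 2*n ≤ n) := by omega
    simp only [h21', not_false_iff, if_true, hg', if_false, h5, dif_pos]
    rw [PySem.Int.floordiv_eq_ediv_of_pos (by omega)]
    have key : (m - 3*n - 1) / (2*n) = (m - 2*n - 3*n - 1) / (2*n) + 1 := by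
      have h2n : (2*n) ≠ 0 := by omega
      have : m - 3*n - 1 = (m - 2*n - 3*n - 1) + 1*(2*n) := by ring
      rw [this, Int.add_mul_ediv_right _ _ h2n]
    have hd' : 0 ≤ (m - 2*n - 3*n - 1) / (2*n) :=
      Int.ediv_nonneg (by omega) (by omega)
    rw [key]
    have ht : ((m - 2*n - 3*n - 1) / (2*n) + 1 + 1).toNat
        = ((m - 2*n - 3*n - 1) / (2*n) + 1).toNat + 1 := by omega
    have harg : m - 2*((m - 2*n - 3*n - 1) / (2*n) + 1 + 1)*n
        = m - 2*n - 2*((m - 2*n - 3*n - 1) / (2*n) + 1)*n := by ring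
    rw [ht, harg, List.replicate_succ, List.cons_append]
  · have hd0 : (m - 3*n - 1)/(2*n) = 0 := Int.ediv_eq_zero_of_lt (by omega) (by omega)
    rw [hd0]
    norm_num

-- A and B agree, by strong induction on m
theorem ab_eq : ∀ (N : Nat) (m n : Int), m.toNat ≤ N →
    berggren_descent m n = berggren_descent_alt m n := by
  intro N
  induction N with
  | zero =>
    intro m n hm
    have hm0 : m ≤ 0 := by omega
    have h21 : ¬(m = 2 ∧ n = 1) := by omega
    rw [berggren_descent, berggren_descent_alt]
    simp [h21, hm0]
  | succ N ih =>
    intro m n hm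
    by_cases h21 : m = 2 ∧ n = 1
    · rw [berggren_descent, berggren_descent_alt]; simp [h21]
    by_cases hg : m ≤ 0 ∨ n ≤ 0 ∨ m ≤ n
    · rw [berggren_descent, berggren_descent_alt]; simp [h21, hg]
    by_cases hM3 : m - 2*n > n ∧ n > 0
    · have e1 : berggren_descent m n = "M3_inv" :: berggren_descent (m - 2*n) n := by
        rw [berggren_descent]; simp [h21, hg, hM3]
      rw [e1, ih (m - 2*n) n (by omega),
        alt_m3_step m n (by omega) (by omega)]
    by_cases hM1 : 2*n - m < n ∧ m < 2*n
    · have e1 : berggren_descent m n = "M1_inv" :: berggren_descent n (2*n - m) := by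
        rw [berggren_descent]; simp [h21, hg, hM3, hM1.1, hM1.2]
      have h3 : ¬ (m > 3*n) := by omega
      have e2 : berggren_descent_alt m n = "M1_inv" :: berggren_descent_alt n (2*n - m) := by
        rw [berggren_descent_alt]; simp [h21, hg, h3, hM1.1, hM1.2]
      rw [e1, e2, ih n (2*n - m) (by omega)]
    · have h3 : ¬ (m > 3*n) := by omega
      rw [berggren_descent, berggren_descent_alt]
      simp [h21, hg, hM3, hM1, h3]

-- ===== VERDICT (by name: the statement is the Claim_ definition above) =====
theorem berggren_descent_spec : Claim_equal_berggren_descent := by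
  intro m n _
  unfold Spec_berggren_descent
  exact ab_eq m.toNat m n le_rfl
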